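-- pv_equiv track=rewrite | github.com/cizhie595-cmyk/- | analysis/ai_analysis/review_analyzer.py | _find_earliest_review_date
-- ===== SOURCE A (Python) =====
-- from typing import Optional
--
-- def _find_earliest_review_date(reviews: list[dict]) -> Optional[str]:
--     """找到最早的评论日期（用于推算上架时间）"""
--     dates = []
--     for r in reviews:
--         date_str = r.get("review_date", "")
--         if date_str:
--             # 只取日期部分
--             date_part = str(date_str)[:10]
--             if len(date_part) == 10:
--                 dates.append(date_part)
--
--     return min(dates) if dates else None
-- ===== SOURCE B (Python) =====
-- from typing import Optional
--
--
-- def _valid_date_part(r: dict) -> Optional[str]: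
--     """Return the 10-char date prefix of r's review_date, or None if absent/invalid."""
--     date_str = r.get("review_date", "")
--     if not date_str:
--         return None
--     date_part = str(date_str)[:10]
--     return date_part if len(date_part) == 10 else None
--
--
-- def _find_earliest_review_date(reviews: list[dict]) -> Optional[str]:
--     """找到最早的评论日期（用于推算上架时间）"""
--     candidates = sorted(d for d in map(_valid_date_part, reviews) if d is not None)
--     return candidates[0] if candidates else None
-- ===== Notes on version B (the rewrite author's own statement) =====
-- stated objective: alternative
-- what changed: Extracts each review's date candidate with a helper into an Option, then sorts the candidate list and returns its first element, instead of A's accumulate-into-a-list loop followed by min().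
import Mathlib
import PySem

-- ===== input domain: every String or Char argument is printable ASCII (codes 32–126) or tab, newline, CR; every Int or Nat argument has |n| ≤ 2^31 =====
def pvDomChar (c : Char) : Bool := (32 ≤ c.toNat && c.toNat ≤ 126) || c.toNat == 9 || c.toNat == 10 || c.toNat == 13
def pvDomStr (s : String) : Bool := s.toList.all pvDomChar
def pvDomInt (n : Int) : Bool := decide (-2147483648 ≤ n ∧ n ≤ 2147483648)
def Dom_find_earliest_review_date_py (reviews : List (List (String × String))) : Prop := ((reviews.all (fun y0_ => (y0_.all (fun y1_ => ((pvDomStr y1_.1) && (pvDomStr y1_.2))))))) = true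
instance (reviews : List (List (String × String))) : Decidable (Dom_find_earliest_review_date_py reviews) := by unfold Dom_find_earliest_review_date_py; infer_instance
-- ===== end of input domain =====

-- B extracts each review's optional date candidate with a helper, sorts the candidates and takes the first, instead of A's accumulate-then-min loop (alternative decomposition).


-- ===== PORT A =====
def find_earliest_review_date_py (reviews : List (List (String × String))) : Option String :=
  let dates := reviews.foldl (fun dates r =>
    let date_str := (PySem.Dict.mk r).getD "review_date" ""
    if date_str ≠ "" then
      let date_part := PySem.Str.slice date_str none (some 10)
      if PySem.Str.len date_part = 10 then dates ++ [date_part] else dates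
    else dates) ([] : List String)
  if dates ≠ [] then PySem.List.min? dates (fun y => y) else none

-- ===== PORT B =====
-- helper of Source B: the optional valid 10-char date prefix of one review
def valid_date_part (r : List (String × String)) : Option String :=
  let date_str := (PySem.Dict.mk r).getD "review_date" ""
  if ¬ (date_str ≠ "") then none
  else
    let date_part := PySem.Str.slice date_str none (some 10)
    if PySem.Str.len date_part = 10 then some date_part else none

def find_earliest_review_date_py_alt (reviews : List (List (String × String))) : Option String :=
  let candidates := PySem.List.sorted ((reviews.map valid_date_part).filterMap (fun d => d)) (fun y => y) false
  match candidates with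
  | [] => none
  | m :: _ => some m

-- ===== PRECONDITION & SPEC =====
def Spec_find_earliest_review_date_py (reviews : List (List (String × String))) (out : Option String) : Prop := out = find_earliest_review_date_py_alt reviews
instance (reviews : List (List (String × String))) (out : Option String) : Decidable (Spec_find_earliest_review_date_py reviews out) := by unfold Spec_find_earliest_review_date_py; infer_instance

-- ===== CLAIM (what is proved, stated in full; the proofs are below) =====
def Claim_equal_find_earliest_review_date_py : Prop := ∀ (reviews : List (List (String × String))), Dom_find_earliest_review_date_py reviews → Spec_find_earliest_review_date_py reviews (find_earliest_review_date_py reviews)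

-- ===== LEMMAS AND PROOFS =====

-- A's accumulating loop collects exactly the valid candidates, in order
lemma pvA_fold (reviews : List (List (String × String))) (ds : List String) :
    reviews.foldl (fun dates r =>
      let date_str := (PySem.Dict.mk r).getD "review_date" ""
      if date_str ≠ "" then
        let date_part := PySem.Str.slice date_str none (some 10)
        if PySem.Str.len date_part = 10 then dates ++ [date_part] else dates
      else dates) ds
    = ds ++ (reviews.map valid_date_part).filterMap (fun d => d) := by
  induction reviews generalizing ds with
  | nil => simp
  | cons r rest ih =>
    simp only [List.foldl_cons, List.map_cons, List.filterMap_cons, ih]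
    unfold valid_date_part
    split_ifs <;> simp_all

-- the running minimum foldl min is a member of x :: t and a lower bound of it
lemma pv_foldl_min_mem (t : List String) (x : String) : t.foldl min x ∈ x :: t := by
  induction t generalizing x with
  | nil => simp
  | cons c t ih =>
    simp only [List.foldl_cons]
    have h := ih (min x c)
    rw [List.mem_cons] at h
    rw [List.mem_cons, List.mem_cons]
    rcases h with h | h
    · rcases min_cases x c with ⟨he, _⟩ | ⟨he, _⟩
      · exact Or.inl (h.trans he)
      · exact Or.inr (Or.inl (h.trans he))
    · exact Or.inr (Or.inr h)

lemma pv_foldl_min_le (t : List String) (x : String) : ∀ y ∈ x :: t, t.foldl min x ≤ y := by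
  induction t generalizing x with
  | nil => simp
  | cons c t ih =>
    intro y hy
    rw [List.mem_cons, List.mem_cons] at hy
    simp only [List.foldl_cons]
    have hx : t.foldl min (min x c) ≤ min x c := ih (min x c) (min x c) (List.mem_cons_self)
    rcases hy with h | h | h
    · exact le_trans (le_trans hx (min_le_left x c)) (le_of_eq h.symm)
    · exact le_trans (le_trans hx (min_le_right x c)) (le_of_eq h.symm)
    · exact ih (min x c) y (List.mem_cons_of_mem _ h)

-- Python's min over a nonempty list equals the head of Python's sorted order
lemma pv_min_eq_sorted_head (cs : List String) :
    (if cs ≠ [] then PySem.List.min? cs (fun y => y) else none)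
    = match PySem.List.sorted cs (fun y => y) false with
      | [] => none
      | m :: _ => some m := by
  cases hcs : cs with
  | nil =>
    have : PySem.List.sorted ([] : List String) (fun y => y) false = [] := by
      rw [PySem.List.sorted_eq_nil_iff]
    simp [this]
  | cons x t =>
    have hne : PySem.List.sorted (x :: t) (fun y => y) false ≠ [] := by
      rw [ne_eq, PySem.List.sorted_eq_nil_iff]; simp
    obtain ⟨m, t', hs⟩ : ∃ m t', PySem.List.sorted (x :: t) (fun y => y) false = m :: t' := by
      cases h : PySem.List.sorted (x :: t) (fun y => y) false with
      | nil => exact absurd h hne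
      | cons m t' => exact ⟨m, t', rfl⟩
    have hmem : m ∈ x :: t := by
      have := PySem.List.sorted_perm (x :: t) (fun y => y) false
      exact this.mem_iff.mp (by simp [hs])
    have hle : ∀ y ∈ x :: t, m ≤ y := PySem.List.key_head_sorted_le (x :: t) (fun y => y) hs
    have hmin : t.foldl min x = m :=
      le_antisymm (pv_foldl_min_le t x m hmem) (hle _ (pv_foldl_min_mem t x))
    rw [PySem.List.min?_id_cons, hs]
    simp [hmin]

-- ===== VERDICT (by name: the statement is the Claim_ definition above) =====
theorem find_earliest_review_date_py_spec : Claim_equal_find_earliest_review_date_py := by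
  intro reviews _
  unfold Spec_find_earliest_review_date_py find_earliest_review_date_py find_earliest_review_date_py_alt
  rw [pvA_fold, List.nil_append, pv_min_eq_sorted_head]
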